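-- pv_equiv track=rewrite | github.com/leesunyong/BaekJoon | 1~10000/9935/solution.py | solution
-- ===== SOURCE A (Python) =====
-- def solution(string, explo):
--     explo = list(explo)
--     length = len(explo)
--     idx = length - 1
--     stack = [string[i] for i in range(length - 1)]
--     while idx < len(string):
--         stack.append(string[idx])
--         idx += 1
--
--         if stack[-length:] == explo:
--             for _ in range(length): stack.pop()
--
--
--     return ''.join(stack) if stack else 'FRULA'
-- ===== SOURCE B (Python) =====
-- def solution(string, explo):
--     # Stack of (char, match-state): state = length of the longest prefix of explo
--     # that is a suffix of the kept characters; pop a whole block when the state hits len(explo).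
--     m = len(explo)
--     stack = []          # entries (char, state)
--     st = 0
--     for c in string:
--         if st < m and c == explo[st]:
--             st += 1
--         else:
--             # recompute: longest k with explo[:k] a suffix of explo[:st] + c
--             t = explo[:st] + c
--             k = min(st + 1, m)
--             while explo[:k] != t[st + 1 - k:]:
--                 k -= 1
--             st = k
--         stack.append((c, st))
--         if st == m:
--             del stack[-m:]
--             st = stack[-1][1] if stack else 0
--     return ''.join(c for c, _ in stack) if stack else 'FRULA'
-- ===== Notes on version B (the rewrite author's own statement) =====
-- stated objective: alternative
-- what changed: Replaces A's per-character list-slice suffix comparison (stack[-m:] == explo on every push) with a stack of (char, KMP-automaton match state) pairs: the state advances in O(1) on a pattern-character match, a full match pops the block and restores the state stored under it, so no stack suffix is ever rebuilt or compared.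
-- outside the precondition, e.g. on solution('ab', ''): A returns 'bab', B returns 'FRULA'; on solution('a', 'abc'): A raises IndexError, B returns 'a'
import Mathlib
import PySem

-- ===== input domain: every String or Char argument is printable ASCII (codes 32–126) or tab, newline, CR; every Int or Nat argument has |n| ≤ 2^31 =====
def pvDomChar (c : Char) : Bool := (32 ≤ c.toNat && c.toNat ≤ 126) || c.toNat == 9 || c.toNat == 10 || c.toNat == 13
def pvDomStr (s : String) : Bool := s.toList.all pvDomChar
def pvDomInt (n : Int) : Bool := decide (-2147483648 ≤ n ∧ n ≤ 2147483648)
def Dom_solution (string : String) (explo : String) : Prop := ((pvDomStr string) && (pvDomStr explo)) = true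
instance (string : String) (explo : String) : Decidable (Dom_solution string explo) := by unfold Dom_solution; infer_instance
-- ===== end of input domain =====

-- B replaces A's per-character list-slice suffix comparison by a stack of KMP-automaton
-- match states (pop a block on full match); objective: alternative (a genuinely different
-- algorithm of similar cost: it tracks match states instead of comparing stack suffixes).

-- ===== PORT A =====
-- while loop: 'stack.append(string[idx]); if stack[-length:] == explo: pop length times'
def solutionLoopA (p : List Char) (length : Nat) : List Char → List Char → List Char
  | stack, [] => stack
  | stack, c :: rest =>
      let stack' := stack ++ [c]
      if PySem.List.slice stack' (some (-(length : Int))) none == p then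
        solutionLoopA p length ((List.range length).foldl (fun s _ => s.dropLast) stack') rest
      else
        solutionLoopA p length stack' rest

def solution (string : String) (explo : String) : String :=
  let exploL := explo.toList
  let length := exploL.length
  -- stack = [string[i] for i in range(length - 1)]   (in range under Pre_)
  let stack := (PySem.List.pyRange 0 ((length : Int) - 1) 1).map
      (fun i => PySem.List.pyGetD string.toList i ' ')
  -- while idx < len(string): consumes string[length-1:], one char per iteration
  let stack := solutionLoopA exploL length stack (string.toList.drop (length - 1))
  if stack.isEmpty then "FRULA" else String.ofList stack

-- ===== PORT B =====
-- 'k = min(st+1, m); while explo[:k] != t[st+1-k:]: k -= 1'  (t has length ln)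
def solutionScanK (p t : List Char) (ln : Nat) : Nat → Nat
  | 0 => 0
  | k + 1 => if p.take (k + 1) == t.drop (ln - (k + 1)) then k + 1 else solutionScanK p t ln k

-- one state transition: 'if st < m and c == explo[st]: st += 1  else: <downward scan>'
def solutionStep (p : List Char) (m st : Nat) (c : Char) : Nat :=
  if decide (st < m) && (p.getD st ' ' == c) then st + 1
  else solutionScanK p (p.take st ++ [c]) (st + 1) (min (st + 1) m)

def solutionLoopB (p : List Char) (m : Nat) : List (Char × Nat) → Nat → List Char → List (Char × Nat)
  | stack, _, [] => stack
  | stack, st, c :: rest =>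
      let st' := solutionStep p m st c
      let stack' := stack ++ [(c, st')]
      if st' == m then
        let stack'' := stack'.take (stack'.length - m)      -- del stack[-m:]
        solutionLoopB p m stack''
          (match stack''.getLast? with | some pr => pr.2 | none => 0) rest
      else
        solutionLoopB p m stack' st' rest

def solution_alt (string : String) (explo : String) : String :=
  let p := explo.toList
  let m := p.length
  let stack := solutionLoopB p m [] 0 string.toList
  if stack.isEmpty then "FRULA" else String.ofList (stack.map Prod.fst)

-- ===== PRECONDITION & SPEC =====
-- Pre_ excludes (a) empty explo, where A's value (the last character fetched via the
-- negative start index -1 prepended to the whole string) is an accident of negative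
-- indexing on a degenerate corner no caller specifies, and (b) strings shorter than
-- len(explo) - 1, on which A raises IndexError in its warm-up comprehension.
def Pre_solution (string : String) (explo : String) : Prop :=
  explo.toList ≠ [] ∧ explo.toList.length ≤ string.toList.length + 1

instance (string : String) (explo : String) : Decidable (Pre_solution string explo) := by
  unfold Pre_solution; infer_instance

def pvWitness_solution : String × String := ("mirkovC4nizCC44", "C4")

def Spec_solution (string : String) (explo : String) (out : String) : Prop := out = solution_alt string explo
instance (string : String) (explo : String) (out : String) : Decidable (Spec_solution string explo out) := by unfold Spec_solution; infer_instance

-- ===== CLAIM (what is proved, stated in full; the proofs are below) =====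
def Claim_equal_solution : Prop := ∀ (string : String) (explo : String), Dom_solution string explo → Pre_solution string explo → Spec_solution string explo (solution string explo)

-- ===== LEMMAS AND PROOFS =====

-- the common abstract step: push c, and if explo is now a suffix, drop that block
def stepSpec (p : List Char) (s : List Char) (c : Char) : List Char :=
  let s' := s ++ [c]
  if p <:+ s' then s'.take (s'.length - p.length) else s'

-- length of the longest prefix of p that is a suffix of s
def lps (p s : List Char) : Nat := Nat.findGreatest (fun k => p.take k <:+ s) p.length

-- stored-state invariant for B's stack
def InvB (p : List Char) (l : List (Char × Nat)) : Prop :=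
  ∀ i (h : i < l.length), l[i].2 = lps p ((l.take (i + 1)).map Prod.fst) ∧ l[i].2 < p.length

theorem lps_nil (p : List Char) : lps p [] = 0 := by
  unfold lps
  rw [Nat.findGreatest_eq_iff]
  refine ⟨Nat.zero_le _, fun h => absurd rfl h, ?_⟩
  intro n hn hle hsuf
  rw [List.suffix_nil] at hsuf
  have : (p.take n).length = 0 := by rw [hsuf]; rfl
  rw [List.length_take] at this
  omega

theorem lps_le (p s : List Char) : lps p s ≤ p.length := Nat.findGreatest_le _

theorem take_suffix_lps (p s : List Char) : p.take (lps p s) <:+ s := by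
  unfold lps
  exact Nat.findGreatest_spec (P := fun k => p.take k <:+ s) (Nat.zero_le _) (by simp)

theorem le_lps (p s : List Char) {k : Nat} (hk : k ≤ p.length) (h : p.take k <:+ s) : k ≤ lps p s := by
  unfold lps
  exact Nat.le_findGreatest hk h

theorem suffix_snoc_iff {a s : List Char} {x c : Char} :
    a ++ [x] <:+ s ++ [c] ↔ x = c ∧ a <:+ s := by
  rw [← List.reverse_prefix]
  simp [List.reverse_append, List.cons_prefix_cons, List.reverse_prefix]

theorem take_suffix_snoc_iff (p s : List Char) (c : Char) {k : Nat} (hk1 : 1 ≤ k) (hkm : k ≤ p.length) :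
    p.take k <:+ s ++ [c] ↔ (p[k - 1]'(by omega) = c ∧ p.take (k - 1) <:+ s) := by
  obtain ⟨j, rfl⟩ : ∃ j, k = j + 1 := ⟨k - 1, by omega⟩
  have hj : j < p.length := by omega
  rw [List.take_add_one, List.getElem?_eq_getElem hj]
  simp only [Option.toList_some, Nat.add_sub_cancel]
  exact suffix_snoc_iff

theorem suffix_of_suffix_le {a b s : List Char} (ha : a <:+ s) (hb : b <:+ s)
    (h : a.length ≤ b.length) : a <:+ b := by
  obtain ⟨u, rfl⟩ := hb
  have h1 : a = (u ++ b).drop ((u ++ b).length - a.length) := List.suffix_iff_eq_drop.mp ha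
  have h2 : (u ++ b).length - a.length = u.length + (b.length - a.length) := by
    have := ha.length_le
    simp only [List.length_append] at this ⊢
    omega
  refine List.suffix_iff_eq_drop.mpr ?_
  conv_lhs => rw [h1, h2, ← List.drop_drop, List.drop_left]

theorem lps_eq_m_iff (p s : List Char) : lps p s = p.length ↔ p <:+ s := by
  constructor
  · intro h
    have := take_suffix_lps p s
    rwa [h, List.take_length] at this
  · intro h
    exact le_antisymm (lps_le p s) (le_lps p s le_rfl (by rwa [List.take_length]))

-- the scan computes a findGreatest
theorem scanK_eq_findGreatest (p t : List Char) (ln : Nat) (k : Nat) :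
    solutionScanK p t ln k = Nat.findGreatest (fun j => p.take j = t.drop (ln - j)) k := by
  induction k with
  | zero => simp [solutionScanK]
  | succ k ih =>
      simp only [solutionScanK, Nat.findGreatest_succ, beq_iff_eq]
      split_ifs with h
      · rfl
      · exact ih

-- automaton step correctness
theorem step_eq_lps (p : List Char) (s : List Char) (c : Char) {st : Nat}
    (hst : st = lps p s) (hlt : st < p.length) :
    solutionStep p p.length st c = lps p (s ++ [c]) := by
  have hts : p.take st <:+ s := by rw [hst]; exact take_suffix_lps p s
  -- any k with p.take k a suffix of s ++ [c] is at most st + 1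
  have hQmax : ∀ j, j ≤ p.length → p.take j <:+ s ++ [c] → j ≤ st + 1 := by
    intro j hj hQ
    rcases Nat.eq_zero_or_pos j with h0 | h1
    · omega
    · have h2 := ((take_suffix_snoc_iff p s c h1 hj).mp hQ).2
      have h3 : j - 1 ≤ st := by rw [hst]; exact le_lps p s (by omega) h2
      omega
  unfold solutionStep
  have hgd : p.getD st ' ' = p[st]'hlt := List.getD_eq_getElem p ' ' hlt
  by_cases hc : p[st]'hlt = c
  · have hcc : (decide (st < p.length) && (p.getD st ' ' == c)) = true := by
      rw [Bool.and_eq_true]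
      exact ⟨decide_eq_true hlt, by rw [hgd]; simp [hc]⟩
    rw [hcc, if_pos rfl]
    unfold lps
    symm
    rw [Nat.findGreatest_eq_iff]
    refine ⟨by omega, fun _ => ?_, ?_⟩
    · -- p.take (st+1) is a suffix of s ++ [c]
      show p.take (st + 1) <:+ s ++ [c]
      rw [take_suffix_snoc_iff p s c (by omega) (by omega)]
      simp only [Nat.add_sub_cancel]
      exact ⟨hc, hts⟩
    · intro n hn hn' hQ
      exact absurd (hQmax n hn' hQ) (by omega)
  · have hcc : (decide (st < p.length) && (p.getD st ' ' == c)) = false := by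
      rw [hgd]
      simp [hc]
    rw [hcc, if_neg (by simp)]
    rw [scanK_eq_findGreatest]
    have htlen : (p.take st ++ [c]).length = st + 1 := by
      simp [List.length_take, Nat.min_eq_left (le_of_lt hlt)]
    -- the scan predicate agrees with the suffix-of-(s ++ [c]) predicate below min (st+1) m
    have hPQ : ∀ j, j ≤ min (st + 1) p.length →
        ((p.take j = (p.take st ++ [c]).drop (st + 1 - j)) ↔ p.take j <:+ s ++ [c]) := by
      intro j hj
      rcases Nat.eq_zero_or_pos j with h0 | h1
      · subst h0
        simp only [List.take_zero]
        constructor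
        · intro _; exact List.nil_suffix
        · intro _
          have : (st + 1) - 0 = (p.take st ++ [c]).length := by omega
          rw [this, List.drop_length]
      · have hjm : j ≤ p.length := by omega
        have hsuf_iff : (p.take j = (p.take st ++ [c]).drop (st + 1 - j)) ↔
            p.take j <:+ p.take st ++ [c] := by
          rw [List.suffix_iff_eq_drop, List.length_take, htlen,
            Nat.min_eq_left hjm]
        rw [hsuf_iff]
        rw [take_suffix_snoc_iff p (p.take st) c h1 hjm,
          take_suffix_snoc_iff p s c h1 hjm]
        constructor
        · rintro ⟨h2, h3⟩
          exact ⟨h2, h3.trans hts⟩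
        · rintro ⟨h2, h3⟩
          refine ⟨h2, suffix_of_suffix_le h3 hts ?_⟩
          rw [List.length_take, List.length_take]
          omega
    -- both sides equal the greatest suffix length
    have hg : lps p (s ++ [c]) ≤ min (st + 1) p.length := by
      have h1 : lps p (s ++ [c]) ≤ p.length := lps_le p _
      have h2 := hQmax _ h1 (take_suffix_lps p (s ++ [c]))
      omega
    rw [Nat.findGreatest_eq_iff]
    refine ⟨hg, fun hne => ?_, ?_⟩
    · show p.take (lps p (s ++ [c])) = _
      rw [hPQ _ hg]
      exact take_suffix_lps p (s ++ [c])
    · intro n hn hn' hP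
      have hQ : p.take n <:+ s ++ [c] := (hPQ n hn').mp hP
      have := le_lps p (s ++ [c]) (by omega) hQ
      omega

-- A-side: pop-m is take (len - m)
theorem popAll_eq (m : Nat) (stack : List Char) (h : m ≤ stack.length) :
    (List.range m).foldl (fun s _ => s.dropLast) stack = stack.take (stack.length - m) := by
  induction m with
  | zero => simp
  | succ m ih =>
      rw [List.range_succ, List.foldl_append, ih (by omega)]
      simp only [List.foldl_cons, List.foldl_nil]
      rw [List.dropLast_eq_take, List.take_take, List.length_take]
      congr 1
      omega

-- A-side: the slice test is the suffix test
theorem sliceA_iff (p s : List Char) (hm : 1 ≤ p.length) :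
    (PySem.List.slice s (some (-(p.length : Int))) none == p) = true ↔ p <:+ s := by
  rw [PySem.List.slice_from_neg_natCast s p.length hm, beq_iff_eq]
  constructor
  · intro h
    rw [← h]
    exact List.drop_suffix _ _
  · intro h
    exact (List.suffix_iff_eq_drop.mp h).symm

theorem loopA_eq_foldl (p : List Char) (hm : 1 ≤ p.length) (cs : List Char) :
    ∀ stack, solutionLoopA p p.length stack cs = cs.foldl (fun s c => stepSpec p s c) stack := by
  induction cs with
  | nil => intro stack; rfl
  | cons c rest ih =>
      intro stack
      rw [List.foldl_cons]
      show (if PySem.List.slice (stack ++ [c]) (some (-(p.length : Int))) none == p then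
          solutionLoopA p p.length
            ((List.range p.length).foldl (fun s _ => s.dropLast) (stack ++ [c])) rest
        else solutionLoopA p p.length (stack ++ [c]) rest) = _
      by_cases h : p <:+ stack ++ [c]
      · rw [if_pos ((sliceA_iff p (stack ++ [c]) hm).mpr h)]
        rw [popAll_eq p.length (stack ++ [c]) h.length_le, ih]
        have hs : stepSpec p stack c = (stack ++ [c]).take ((stack ++ [c]).length - p.length) := by
          unfold stepSpec
          rw [if_pos h]
        rw [hs]
      · rw [if_neg (by rw [sliceA_iff p (stack ++ [c]) hm]; exact h), ih]
        have hs : stepSpec p stack c = stack ++ [c] := by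
          unfold stepSpec
          rw [if_neg h]
        rw [hs]

-- no pop can fire while fewer than m characters have been seen
theorem foldl_stepSpec_short (p : List Char) (l : List Char) :
    ∀ s, s.length + l.length < p.length → l.foldl (fun a c => stepSpec p a c) s = s ++ l := by
  induction l with
  | nil => intro s _; simp
  | cons c rest ih =>
      intro s hlen
      rw [List.foldl_cons]
      have hns : ¬ p <:+ s ++ [c] := by
        intro h
        have := h.length_le
        simp only [List.length_append, List.length_cons, List.length_nil] at this hlen
        omega
      have hs : stepSpec p s c = s ++ [c] := by unfold stepSpec; rw [if_neg hns]
      rw [hs, ih (s ++ [c]) (by simp at hlen ⊢; omega)]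
      simp

theorem init_take (xs : List Char) (n : Nat) (h : n ≤ xs.length) :
    (List.range n).map (fun k => xs.getD k ' ') = xs.take n := by
  apply List.ext_getElem
  · simp [List.length_take]; omega
  · intro i h1 h2
    simp only [List.getElem_map, List.getElem_range, List.getElem_take]
    rw [List.getD_eq_getElem]

theorem invB_take (p : List Char) (l : List (Char × Nat)) (n : Nat) (h : InvB p l) :
    InvB p (l.take n) := by
  intro i hi
  have hlen : i < l.length := by
    rw [List.length_take] at hi; omega
  have h1 : i + 1 ≤ n := by
    rw [List.length_take] at hi; omega
  rw [List.getElem_take, List.take_take, Nat.min_eq_left h1]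
  exact h i hlen

theorem loopB_eq_foldl (p : List Char) (hm : 1 ≤ p.length) (cs : List Char) :
    ∀ stack st, InvB p stack → st = lps p (stack.map Prod.fst) → st < p.length →
      (solutionLoopB p p.length stack st cs).map Prod.fst =
        cs.foldl (fun s c => stepSpec p s c) (stack.map Prod.fst) := by
  induction cs with
  | nil => intro stack st _ _ _; rfl
  | cons c rest ih =>
      intro stack st hInv hst hlt
      rw [List.foldl_cons]
      have hst' : solutionStep p p.length st c = lps p (stack.map Prod.fst ++ [c]) :=
        step_eq_lps p (stack.map Prod.fst) c hst hlt
      simp only [solutionLoopB]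
      by_cases hpop : p <:+ stack.map Prod.fst ++ [c]
      · -- pop branch
        have heq : solutionStep p p.length st c = p.length := by
          rw [hst', lps_eq_m_iff]; exact hpop
        rw [heq]
        simp only [beq_self_eq_true, if_true]
        have hKle : (stack ++ [(c, p.length)]).length - p.length ≤ stack.length := by
          simp only [List.length_append, List.length_cons, List.length_nil]
          omega
        have htk : (stack ++ [(c, p.length)]).take ((stack ++ [(c, p.length)]).length - p.length)
            = stack.take (stack.length + 1 - p.length) := by
          rw [List.take_append_of_le_length (by simpa using hKle)]
          congr 1
          simp
        have hmap : (stack.take (stack.length + 1 - p.length)).map Prod.fst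
            = (stack.map Prod.fst ++ [c]).take ((stack.map Prod.fst ++ [c]).length - p.length) := by
          have hhm : 1 ≤ p.length := hm
          rw [List.map_take, List.take_append_of_le_length (by simp; omega)]
          congr 1
          simp
        have hspec : stepSpec p (stack.map Prod.fst) c
            = (stack.map Prod.fst ++ [c]).take ((stack.map Prod.fst ++ [c]).length - p.length) := by
          unfold stepSpec
          rw [if_pos hpop]
        rw [hspec, ← hmap, htk]
        set stack'' := stack.take (stack.length + 1 - p.length) with hs''
        have hInv'' : InvB p stack'' := invB_take p stack _ hInv
        have hmap'' : ∀ pr, stack''.getLast? = some pr → pr.2 = lps p (stack''.map Prod.fst) ∧ pr.2 < p.length := by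
          intro pr hpr
          have hne : stack'' ≠ [] := by
            intro h0; rw [h0] at hpr; simp at hpr
          have hlen0 : 0 < stack''.length := List.length_pos_iff.mpr hne
          rw [List.getLast?_eq_getElem?, List.getElem?_eq_getElem (by omega)] at hpr
          have := hInv'' (stack''.length - 1) (by omega)
          rw [show stack''.length - 1 + 1 = stack''.length from by omega, List.take_length] at this
          cases hpr
          exact this
        cases hL : stack''.getLast? with
        | none =>
            have h0 : stack'' = [] := List.getLast?_eq_none_iff.mp hL
            rw [h0]
            exact ih [] 0 (fun i hi => absurd hi (by simp)) (by simp [lps_nil]) (by omega)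
        | some pr =>
            obtain ⟨h1, h2⟩ := hmap'' pr hL
            exact ih stack'' pr.2 hInv'' h1 h2
      · -- no-pop branch
        have hlt' : lps p (stack.map Prod.fst ++ [c]) < p.length :=
          lt_of_le_of_ne (lps_le p _) (fun h => hpop ((lps_eq_m_iff p _).mp h))
        have hne : ¬ (solutionStep p p.length st c == p.length) = true := by
          rw [beq_iff_eq, hst']
          omega
        rw [if_neg hne]
        have hInv' : InvB p (stack ++ [(c, solutionStep p p.length st c)]) := by
          intro i hi
          simp only [List.length_append, List.length_cons, List.length_nil] at hi
          rcases Nat.lt_or_ge i stack.length with hilt | hige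
          · rw [List.getElem_append_left hilt,
              List.take_append_of_le_length (by omega)]
            exact hInv i hilt
          · have hieq : i = stack.length := by omega
            subst hieq
            have hel : (stack ++ [(c, solutionStep p p.length st c)])[stack.length]'(by simp)
                = (c, solutionStep p p.length st c) := by simp
            rw [hel]
            refine ⟨?_, by rw [hst']; exact hlt'⟩
            rw [show stack.length + 1 = (stack ++ [(c, solutionStep p p.length st c)]).length from by simp,
              List.take_length]
            simp [hst']
        have hspec : stepSpec p (stack.map Prod.fst) c = stack.map Prod.fst ++ [c] := by
          unfold stepSpec
          rw [if_neg hpop]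
        rw [hspec]
        have := ih (stack ++ [(c, solutionStep p p.length st c)]) (solutionStep p p.length st c)
          hInv' (by simp [hst']) (by rw [hst']; exact hlt')
        rw [this, List.map_append]
        simp

-- ===== VERDICT (by name: the statement is the Claim_ definition above) =====
theorem solution_spec : Claim_equal_solution := by
  intro str e _ hpre
  obtain ⟨hne, hlen⟩ := hpre
  have hm : 1 ≤ e.toList.length := List.length_pos_iff.mpr hne
  unfold Spec_solution solution solution_alt
  set p := e.toList with hp
  set cs := str.toList with hcs
  have hinit : (PySem.List.pyRange 0 ((p.length : Int) - 1) 1).map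
      (fun i => PySem.List.pyGetD cs i ' ') = cs.take (p.length - 1) := by
    rw [PySem.List.pyRange_one]
    have h1 : (((p.length : Int) - 1) - 0).toNat = p.length - 1 := by omega
    rw [h1, List.map_map]
    have h2 : ((fun i => PySem.List.pyGetD cs i ' ') ∘ fun k : Nat => (0 : Int) + ↑k)
        = fun k : Nat => cs.getD k ' ' := by
      funext k
      simp
    rw [h2]
    exact init_take cs (p.length - 1) (by omega)
  have hA : solutionLoopA p p.length (cs.take (p.length - 1)) (cs.drop (p.length - 1))
      = cs.foldl (fun s c => stepSpec p s c) [] := by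
    rw [loopA_eq_foldl p hm]
    have h3 : (cs.take (p.length - 1)).foldl (fun s c => stepSpec p s c) [] = cs.take (p.length - 1) := by
      have := foldl_stepSpec_short p (cs.take (p.length - 1)) []
        (by simp only [List.length_nil, List.length_take]; omega)
      simpa using this
    rw [← h3, ← List.foldl_append, List.take_append_drop]
  have hB : (solutionLoopB p p.length [] 0 cs).map Prod.fst
      = cs.foldl (fun s c => stepSpec p s c) [] :=
    loopB_eq_foldl p hm cs [] 0 (fun i hi => absurd hi (by simp))
      (by simp [lps_nil]) (by omega)
  simp only
  rw [hinit, hA, ← List.isEmpty_map (f := Prod.fst) (l := solutionLoopB p p.length [] 0 cs), hB]
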